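-- pv_equiv track=rewrite | github.com/ggllima/Algorithms | Python/persistence.py | persistence
-- ===== SOURCE A (Python) =====
-- def persistence(number):
--     str_num = str(number)
--     produto = 1
--     count = 0
--     new_list = []
--     l = [int(indice) for indice in str_num]
--     for y in l:
--         produto *= y
--         count = count + 1
--     new_list.append(produto)
--     if new_list[0] > 9:
--         return persistence(new_list[0])
--     else:
--         return new_list
-- ===== SOURCE B (Python) =====
-- def persistence(number):
--     while True:
--         prod = 1
--         for c in str(number):
--             prod *= int(c)
--         if prod <= 9:
--             return [prod]
--         number = prod
-- ===== Notes on version B (the rewrite author's own statement) =====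
-- stated objective: simpler
-- what changed: Replaces A's tail recursion with list-building (l, new_list, dead count variable) by a plain iterative while-loop maintaining only a running digit product.
import Mathlib
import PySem

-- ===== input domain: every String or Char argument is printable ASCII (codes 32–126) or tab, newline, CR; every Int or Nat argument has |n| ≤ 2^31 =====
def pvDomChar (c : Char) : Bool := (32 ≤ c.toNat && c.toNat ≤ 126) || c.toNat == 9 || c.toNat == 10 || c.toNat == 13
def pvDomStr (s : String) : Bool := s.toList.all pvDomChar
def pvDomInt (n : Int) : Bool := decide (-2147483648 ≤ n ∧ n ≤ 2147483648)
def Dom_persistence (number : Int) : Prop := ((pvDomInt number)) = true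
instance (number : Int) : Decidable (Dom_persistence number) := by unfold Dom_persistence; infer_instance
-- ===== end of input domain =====

-- B replaces A's tail recursion with list-building (and a dead counter) by a plain
-- iterative while-loop keeping only a running digit product; return value equivalence on Pre_.


-- ===== PORT A =====
-- int(indice) for a single char; .getD 0 is unreachable on Pre_ (digits of a nonnegative
-- number all parse); Python raises ValueError exactly where ofChars? is none ('-' of a negative).
def pvParseDigit (c : Char) : Int := (PySem.Int.ofChars? [c]).getD 0

-- fuel guard only (makes the recursion total; never reached on Dom ∩ Pre_, where the
-- digit product strictly decreases and natAbs + 1 steps amply suffice)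
def persistenceA : Nat → Int → List Int
  | 0, n => [n]
  | fuel + 1, n =>
    let str_num := PySem.Int.toChars n
    let l := str_num.map pvParseDigit
    let pc := l.foldl (fun (pc : Int × Int) y => (pc.1 * y, pc.2 + 1)) (1, 0)
    let new_list := [pc.1]
    if PySem.List.pyGetD new_list 0 0 > 9 then
      persistenceA fuel (PySem.List.pyGetD new_list 0 0)
    else
      new_list

def persistence (number : Int) : List Int := persistenceA (number.natAbs + 1) number

-- ===== PORT B =====
-- while True: prod := product of digits of n; if prod ≤ 9 return [prod] else n := prod
def persistenceAltLoop : Nat → Int → List Int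
  | 0, n => [n]
  | fuel + 1, n =>
    let prod := (PySem.Int.toChars n).foldl (fun p c => p * pvParseDigit c) 1
    if prod ≤ 9 then [prod] else persistenceAltLoop fuel prod

def persistence_alt (number : Int) : List Int := persistenceAltLoop (number.natAbs + 1) number

-- ===== PRECONDITION & SPEC =====
-- Pre_ excludes exactly the negative numbers, on which both Pythons raise ValueError (int('-')).
def Pre_persistence (number : Int) : Prop := 0 ≤ number
instance (number : Int) : Decidable (Pre_persistence number) := by unfold Pre_persistence; infer_instance
def pvWitness_persistence : Int := (39)

def Spec_persistence (number : Int) (out : List Int) : Prop := out = persistence_alt number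
instance (number : Int) (out : List Int) : Decidable (Spec_persistence number out) := by unfold Spec_persistence; infer_instance

-- ===== CLAIM (what is proved, stated in full; the proofs are below) =====
def Claim_equal_persistence : Prop := ∀ (number : Int), Dom_persistence number → Pre_persistence number → Spec_persistence number (persistence number)

-- ===== LEMMAS AND PROOFS =====

-- A's pair-fold over the pre-built list l computes the same product as B's running fold.
lemma pair_fold_fst (cs : List Char) (p c0 : Int) :
    ((cs.map pvParseDigit).foldl (fun (pc : Int × Int) y => (pc.1 * y, pc.2 + 1)) (p, c0)).1
      = cs.foldl (fun p c => p * pvParseDigit c) p := by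
  induction cs generalizing p c0 with
  | nil => rfl
  | cons c cs ih => simpa using ih (p * pvParseDigit c) (c0 + 1)

-- step for step: both ports recurse on the same digit product under the same guard
lemma persistenceA_eq_altLoop (fuel : Nat) (n : Int) :
    persistenceA fuel n = persistenceAltLoop fuel n := by
  induction fuel generalizing n with
  | zero => rfl
  | succ f ih =>
    simp only [persistenceA, persistenceAltLoop, PySem.List.pyGetD_zero_cons, pair_fold_fst]
    set p := (PySem.Int.toChars n).foldl (fun p c => p * pvParseDigit c) 1 with hp
    by_cases hq : p ≤ 9
    · rw [if_neg (by omega : ¬ p > 9), if_pos hq]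
    · rw [if_pos (by omega : p > 9), if_neg hq, ih p]

-- ===== VERDICT (by name: the statement is the Claim_ definition above) =====
theorem persistence_spec : Claim_equal_persistence := by
  intro n _ _
  unfold Spec_persistence persistence persistence_alt
  exact persistenceA_eq_altLoop _ n
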